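-- pv_equiv track=rewrite | github.com/tsbloxsom/303-Python | project3.5.py | message_to_size
-- ===== SOURCE A (Python) =====
-- def message_to_size(message, word):
--     size_message = []
--     while len(size_message) < len(message):
--         for i in word:
--             size_message.append(i)
--     while len(size_message) > len(message):
--         del size_message[-1]
--     return size_message
-- ===== SOURCE B (Python) =====
-- def message_to_size(message, word):
--     n = len(message)
--     if n == 0:
--         return []
--     return list((word * (n // len(word) + 1))[:n])
-- ===== Notes on version B (the rewrite author's own statement) =====
-- stated objective: simpler
-- what changed: Replaces the grow-loop plus trailing-delete trim loop by one string-repetition expression: word repeated n//len(word)+1 times, sliced to the first n elements.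
import Mathlib
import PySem

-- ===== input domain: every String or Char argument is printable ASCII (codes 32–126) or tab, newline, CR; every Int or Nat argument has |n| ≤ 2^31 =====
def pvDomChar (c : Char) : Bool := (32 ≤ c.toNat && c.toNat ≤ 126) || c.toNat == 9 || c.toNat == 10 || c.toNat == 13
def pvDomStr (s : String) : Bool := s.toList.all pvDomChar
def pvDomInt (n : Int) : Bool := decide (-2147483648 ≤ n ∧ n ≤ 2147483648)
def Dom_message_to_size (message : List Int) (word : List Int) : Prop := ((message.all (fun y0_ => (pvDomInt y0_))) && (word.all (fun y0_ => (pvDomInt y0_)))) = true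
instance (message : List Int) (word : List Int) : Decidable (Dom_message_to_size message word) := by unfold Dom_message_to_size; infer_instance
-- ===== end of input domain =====

-- B replaces A's grow-then-trim loops by one repetition-and-slice expression (simpler decomposition, same cost).


-- ===== PORT A =====
-- the first while loop: append the whole word while len(acc) < n; fuel is a totality guard only
-- (under Pre_, word ≠ [] whenever n > 0, so n+1 iterations always suffice)
def pvGrowA (n : Nat) (word : List Int) : Nat → List Int → List Int
  | 0, acc => acc
  | fuel + 1, acc => if acc.length < n then pvGrowA n word fuel (acc ++ word) else acc

-- the second while loop: delete the last element while len(acc) > n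
def pvTrimA (n : Nat) (acc : List Int) : List Int :=
  if h : n < acc.length then pvTrimA n acc.dropLast else acc
  termination_by acc.length
  decreasing_by
    simp only [List.length_dropLast]; omega

def message_to_size (message : List Int) (word : List Int) : List Int :=
  pvTrimA message.length (pvGrowA message.length word (message.length + 1) [])

-- ===== PORT B =====
def message_to_size_alt (message : List Int) (word : List Int) : List Int :=
  let n := message.length
  if n = 0 then []
  else ((List.replicate (n / word.length + 1) word).flatten).take n

-- ===== PRECONDITION & SPEC =====
-- Pre_ excludes exactly the inputs (nonempty message, empty word) on which Python A loops forever.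
def Pre_message_to_size (message : List Int) (word : List Int) : Prop :=
  message = [] ∨ word ≠ []
instance (message : List Int) (word : List Int) : Decidable (Pre_message_to_size message word) := by
  unfold Pre_message_to_size; infer_instance
def pvWitness_message_to_size : List Int × List Int := ([1, 2, 3], [7, 8])

def Spec_message_to_size (message : List Int) (word : List Int) (out : List Int) : Prop := out = message_to_size_alt message word
instance (message : List Int) (word : List Int) (out : List Int) : Decidable (Spec_message_to_size message word out) := by unfold Spec_message_to_size; infer_instance

-- ===== CLAIM (what is proved, stated in full; the proofs are below) =====
def Claim_equal_message_to_size : Prop := ∀ (message : List Int) (word : List Int), Dom_message_to_size message word → Pre_message_to_size message word → Spec_message_to_size message word (message_to_size message word)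

-- ===== LEMMAS AND PROOFS =====

theorem pvGrowA_spec (n : Nat) (word : List Int) (hw : word ≠ []) :
    ∀ (fuel : Nat) (acc : List Int), n ≤ acc.length + fuel * word.length →
      ∃ j, pvGrowA n word fuel acc = acc ++ (List.replicate j word).flatten ∧
           n ≤ (pvGrowA n word fuel acc).length := by
  intro fuel
  induction fuel with
  | zero =>
    intro acc h
    exact ⟨0, by simp [pvGrowA], by simpa [pvGrowA] using by omega⟩
  | succ f ih =>
    intro acc h
    by_cases hlt : acc.length < n
    · have hwlen : 1 ≤ word.length := List.length_pos_iff.mpr hw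
      have h' : n ≤ (acc ++ word).length + f * word.length := by
        simp only [List.length_append]
        have : (f + 1) * word.length = f * word.length + word.length := by ring
        omega
      obtain ⟨j, hj, hlen⟩ := ih (acc ++ word) h'
      refine ⟨j + 1, ?_, ?_⟩
      · simp only [pvGrowA, if_pos hlt, hj, List.replicate_succ, List.flatten_cons,
          List.append_assoc]
      · simpa [pvGrowA, if_pos hlt] using hlen
    · exact ⟨0, by simp [pvGrowA, if_neg hlt], by simp [pvGrowA, if_neg hlt]; omega⟩

theorem pvTrimA_spec_aux (n : Nat) : ∀ (k : Nat) (acc : List Int), acc.length ≤ k →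
    n ≤ acc.length → pvTrimA n acc = acc.take n := by
  intro k
  induction k with
  | zero =>
    intro acc hk h
    rw [pvTrimA.eq_def, dif_neg (by omega), List.take_of_length_le (by omega)]
  | succ k ih =>
    intro acc hk h
    by_cases hlt : n < acc.length
    · have hlen : n ≤ acc.dropLast.length := by simp only [List.length_dropLast]; omega
      have hk' : acc.dropLast.length ≤ k := by simp only [List.length_dropLast]; omega
      rw [pvTrimA.eq_def, dif_pos hlt, ih acc.dropLast hk' hlen, List.dropLast_eq_take, List.take_take]
      congr 1; omega
    · rw [pvTrimA.eq_def, dif_neg hlt, List.take_of_length_le (by omega)]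

theorem pvTrimA_spec (n : Nat) (acc : List Int) (h : n ≤ acc.length) : pvTrimA n acc = acc.take n :=
  pvTrimA_spec_aux n acc.length acc le_rfl h

theorem length_flatten_replicate (k : Nat) (w : List Int) :
    ((List.replicate k w).flatten).length = k * w.length := by
  induction k with
  | zero => simp
  | succ k ih => simp [List.replicate_succ, ih]; ring

theorem take_flatten_replicate_mono (w : List Int) (n a b : Nat) (hab : a ≤ b)
    (ha : n ≤ a * w.length) :
    ((List.replicate b w).flatten).take n = ((List.replicate a w).flatten).take n := by
  have : List.replicate b w = List.replicate a w ++ List.replicate (b - a) w := by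
    rw [← List.replicate_add]; congr 1; omega
  rw [this, List.flatten_append, List.take_append_of_le_length]
  rw [length_flatten_replicate]; exact ha

theorem take_flatten_replicate_eq (w : List Int) (n a b : Nat)
    (ha : n ≤ a * w.length) (hb : n ≤ b * w.length) :
    ((List.replicate a w).flatten).take n = ((List.replicate b w).flatten).take n := by
  rcases le_total a b with h | h
  · rw [take_flatten_replicate_mono w n a b h ha]
  · rw [take_flatten_replicate_mono w n b a h hb]

-- ===== VERDICT (by name: the statement is the Claim_ definition above) =====
theorem message_to_size_spec : Claim_equal_message_to_size := by
  intro message word _ hpre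
  unfold Spec_message_to_size message_to_size message_to_size_alt
  by_cases h0 : message = []
  · subst h0
    simp only [List.length_nil]
    rw [pvTrimA_spec 0 _ (by omega)]
    simp
  · have hn : message.length ≠ 0 := by simpa using h0
    have hw : word ≠ [] := by
      rcases hpre with hm | hw
      · exact absurd hm h0
      · exact hw
    have hwlen : 1 ≤ word.length := List.length_pos_iff.mpr hw
    have hfuel : message.length ≤ ([] : List Int).length + (message.length + 1) * word.length := by
      simp; nlinarith
    obtain ⟨j, hj, hlen⟩ := pvGrowA_spec message.length word hw (message.length + 1) [] hfuel
    rw [pvTrimA_spec message.length _ hlen, hj, List.nil_append]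
    have hjlen : message.length ≤ j * word.length := by
      have := hlen
      rw [hj, List.nil_append, length_flatten_replicate] at this
      exact this
    have hblen : message.length ≤ (message.length / word.length + 1) * word.length := by
      have hlt : message.length % word.length < word.length := Nat.mod_lt _ (by omega)
      nlinarith [Nat.div_add_mod message.length word.length]
    simp only [if_neg hn]
    exact take_flatten_replicate_eq word message.length j (message.length / word.length + 1) hjlen hblen
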